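-- pv_equiv track=rewrite | github.com/aaronwppe/bp-pre-internship | python/42.py | sum_of_duplicates
-- ===== SOURCE A (Python) =====
-- def sum_of_duplicates(array: list[int]) -> int:
--     traversed = dict()
--
--     for element in array:
--         if element not in traversed:
--             traversed[element] = 0
--         else:
--             traversed[element] = element
--
--     return sum(traversed.values())
-- ===== SOURCE B (Python) =====
-- def sum_of_duplicates(array: list[int]) -> int:
--     s = sorted(array)
--     n = len(s)
--     total = 0
--     i = 0
--     while i < n:
--         j = i + 1
--         while j < n and s[j] == s[i]:
--             j += 1
--         if j - i >= 2:
--             total += s[i]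
--         i = j
--     return total
-- ===== Notes on version B (the rewrite author's own statement) =====
-- stated objective: alternative
-- what changed: B sorts the array and sums the first element of every run of length >= 2 in a two-level run scan, instead of A's one-pass dict with a 0/element sentinel summed over all values.
import Mathlib
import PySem

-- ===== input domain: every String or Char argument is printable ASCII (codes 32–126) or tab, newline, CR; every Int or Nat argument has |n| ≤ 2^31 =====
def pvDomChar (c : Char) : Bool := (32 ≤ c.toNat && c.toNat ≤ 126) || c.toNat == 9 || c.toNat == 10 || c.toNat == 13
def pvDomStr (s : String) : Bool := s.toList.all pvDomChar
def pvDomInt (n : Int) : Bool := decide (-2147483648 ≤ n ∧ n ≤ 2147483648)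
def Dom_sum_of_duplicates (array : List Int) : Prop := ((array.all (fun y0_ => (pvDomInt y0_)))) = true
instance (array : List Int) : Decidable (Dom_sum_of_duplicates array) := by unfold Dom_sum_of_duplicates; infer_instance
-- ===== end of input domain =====

-- B sorts the array and sums the first element of every run of length ≥ 2, replacing A's
-- sentinel dict built in one pass (alternative algorithm, not claimed faster).

-- ===== PORT A =====
def sum_of_duplicates (array : List Int) : Int :=
  let traversed : PySem.Dict Int Int :=
    array.foldl (fun d element =>
      if !(d.contains element) then d.insert element 0 else d.insert element element)
      PySem.Dict.empty
  traversed.values.sum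

-- ===== PORT B =====
-- inner while loop: number of further leading copies of `head` at the front of the suffix
def pvRun (head : Int) : List Int → Nat
  | [] => 0
  | x :: xs => if x = head then pvRun head xs + 1 else 0

-- outer while loop over the remaining suffix `rest`, accumulator `total`
def pvScan : List Int → Int → Int
  | [], total => total
  | h :: t, total =>
      pvScan (t.drop ((1 + pvRun h t) - 1))
        (if 1 + pvRun h t ≥ 2 then total + h else total)
termination_by s _ => s.length
decreasing_by simp [List.length_drop]

def sum_of_duplicates_alt (array : List Int) : Int :=
  pvScan (PySem.List.sorted array (fun x => x) false) 0

-- ===== PRECONDITION & SPEC =====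
def Spec_sum_of_duplicates (array : List Int) (out : Int) : Prop := out = sum_of_duplicates_alt array
instance (array : List Int) (out : Int) : Decidable (Spec_sum_of_duplicates array out) := by unfold Spec_sum_of_duplicates; infer_instance

-- ===== CLAIM (what is proved, stated in full; the proofs are below) =====
def Claim_equal_sum_of_duplicates : Prop := ∀ (array : List Int), Dom_sum_of_duplicates array → Spec_sum_of_duplicates array (sum_of_duplicates array)

-- ===== LEMMAS AND PROOFS =====

-- The common value both programs compute: the sum, over the distinct elements, of those
-- occurring at least twice.
def pvF (xs : List Int) : Int :=
  ((PySem.Set.ofList xs).map (fun k => if 2 ≤ xs.count k then (k : Int) else 0)).sum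

-- A's loop step, written as a single insert.
theorem stepA_eq (d : PySem.Dict Int Int) (e : Int) :
    (if !(d.contains e) then d.insert e 0 else d.insert e e)
      = d.insert e (if d.contains e then e else 0) := by
  cases h : d.contains e <;> simp_all

-- Items of A's dict after the whole loop.
theorem A_items (xs : List Int) :
    (xs.foldl (fun d element =>
        if !(d.contains element) then d.insert element 0 else d.insert element element)
      (PySem.Dict.empty : PySem.Dict Int Int)).items
    = (PySem.Set.ofList xs).map (fun k => (k, if 2 ≤ xs.count k then (k : Int) else 0)) := by
  induction xs using List.reverseRecOn with
  | nil => rfl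
  | append_singleton xs x ih =>
    rw [List.foldl_append, List.foldl_cons, List.foldl_nil]
    have hfold : (xs.foldl (fun d element =>
          if !(d.contains element) then d.insert element 0 else d.insert element element)
        (PySem.Dict.empty : PySem.Dict Int Int))
        = xs.foldl (fun (d : PySem.Dict Int Int) e => d.insert e (if d.contains e then e else 0))
            PySem.Dict.empty :=
      PySem.List.foldl_congr_mem xs _ _ _ (fun acc y _ => stepA_eq acc y)
    have hkeys : (xs.foldl (fun d element =>
        if !(d.contains element) then d.insert element 0 else d.insert element element)
      (PySem.Dict.empty : PySem.Dict Int Int)).keys = PySem.Set.ofList xs := by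
      rw [hfold]
      have := PySem.Dict.keys_foldl_insert xs
        (fun (d : PySem.Dict Int Int) e => if d.contains e then e else 0) PySem.Dict.empty
      simpa [PySem.Set.update_nil_left] using this
    set d := xs.foldl (fun d element =>
        if !(d.contains element) then d.insert element 0 else d.insert element element)
      (PySem.Dict.empty : PySem.Dict Int Int) with hd
    by_cases hx : x ∈ xs
    · have hc : d.contains x = true := by
        rw [PySem.Dict.contains_eq_decide_mem_keys, hkeys]
        simp [PySem.Set.mem_ofList, hx]
      rw [stepA_eq, if_pos hc]
      rw [PySem.Dict.items_insert_of_contains, ih]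
      rw [PySem.Set.ofList_append_singleton,
          PySem.Set.add_of_mem (by simp [PySem.Set.mem_ofList, hx])]
      rw [List.map_map]
      apply List.map_congr_left
      intro k hk
      by_cases hkx : k = x
      · subst hkx
        have h1 : 1 ≤ xs.count k := List.one_le_count_iff.mpr hx
        have h2 : 2 ≤ (xs ++ [k]).count k := by
          simp [List.count_append]; omega
        simp [Function.comp, hx]
      · have hcnt : (xs ++ [x]).count k = xs.count k := by
          simp [List.count_append, List.count_singleton]
          exact fun h => hkx h.symm
        simp [Function.comp, hkx, hcnt]
      · exact hc
    · have hc : d.contains x = false := by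
        rw [PySem.Dict.contains_eq_decide_mem_keys, hkeys]
        simp [PySem.Set.mem_ofList, hx]
      rw [stepA_eq, if_neg (by simp [hc])]
      rw [PySem.Dict.items_insert_of_not_contains, ih]
      rw [PySem.Set.ofList_append_singleton,
          PySem.Set.add_of_not_mem (by simp [PySem.Set.mem_ofList, hx])]
      rw [List.map_append]
      congr 1
      · apply List.map_congr_left
        intro k hk
        have hkx : k ≠ x := by
          intro h; exact hx (by simpa [PySem.Set.mem_ofList, h] using hk)
        have hcnt : (xs ++ [x]).count k = xs.count k := by
          simp [List.count_append, List.count_singleton]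
          exact fun h => hkx h.symm
        simp [hcnt]
      · have hcx : xs.count x = 0 := List.count_eq_zero.mpr hx
        simp [List.count_append, hcx]
      · exact hc

-- A computes pvF.
theorem A_eq_pvF (xs : List Int) : sum_of_duplicates xs = pvF xs := by
  unfold sum_of_duplicates pvF
  simp only [PySem.Dict.values, A_items, List.map_map]
  rfl

-- pvF is invariant under permutation of the input.
theorem pvF_perm {xs ys : List Int} (hp : xs.Perm ys) : pvF xs = pvF ys := by
  unfold pvF
  have hsets : (PySem.Set.ofList xs).Perm (PySem.Set.ofList ys) := by
    rw [List.perm_ext_iff_of_nodup (PySem.Set.nodup_ofList xs) (PySem.Set.nodup_ofList ys)]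
    intro a
    simp [PySem.Set.mem_ofList, hp.mem_iff]
  have hcnt : ∀ k : Int, xs.count k = ys.count k := fun k => hp.count_eq k
  calc ((PySem.Set.ofList xs).map (fun k => if 2 ≤ xs.count k then (k : Int) else 0)).sum
      = ((PySem.Set.ofList xs).map (fun k => if 2 ≤ ys.count k then (k : Int) else 0)).sum := by
        simp only [hcnt]
    _ = ((PySem.Set.ofList ys).map (fun k => if 2 ≤ ys.count k then (k : Int) else 0)).sum :=
        (hsets.map _).sum_eq

-- ofList of a non-empty constant run is the singleton.
theorem ofList_replicate_succ (m : Nat) (h : Int) :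
    PySem.Set.ofList (List.replicate (m + 1) h) = [h] := by
  induction m with
  | zero => rfl
  | succ m ih =>
    rw [List.replicate_succ, PySem.Set.ofList_cons, ih]
    simp [PySem.Set.discard]

-- Splitting pvF at a leading run: a run of m+1 copies of h followed by elements ≠ h.
theorem pvF_run_split (m : Nat) (h : Int) (d : List Int) (hd : h ∉ d) :
    pvF (List.replicate (m + 1) h ++ d)
      = (if 2 ≤ m + 1 then h else 0) + pvF d := by
  unfold pvF
  have hset : PySem.Set.ofList (List.replicate (m + 1) h ++ d) = h :: PySem.Set.ofList d := by
    rw [PySem.Set.ofList_append, ofList_replicate_succ]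
    rw [PySem.Set.update_eq_append_filter]
    have : (PySem.Set.ofList d).filter (fun y => !(PySem.Set.contains [h] y))
        = PySem.Set.ofList d := by
      apply List.filter_eq_self.mpr
      intro y hy
      have hyd : y ∈ d := (PySem.Set.mem_ofList _ _).mp hy
      have hne : y ≠ h := fun e => hd (e ▸ hyd)
      have hne' : ¬ (h = y) := fun e => hne e.symm
      simp [PySem.Set.contains, hne]
    rw [this]; rfl
  have hcd : ∀ k, k ≠ h → (List.replicate (m + 1) h ++ d).count k = d.count k := by
    intro k hk
    have hk' : ¬ (h = k) := fun e => hk e.symm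
    simp [List.count_append, List.count_replicate, hk']
  have hch : (List.replicate (m + 1) h ++ d).count h = m + 1 := by
    have : d.count h = 0 := List.count_eq_zero.mpr hd
    simp [List.count_append, this]
  rw [hset, List.map_cons, List.sum_cons, hch]
  congr 1
  apply congrArg
  apply List.map_congr_left
  intro k hk
  have hkd : k ∈ d := (PySem.Set.mem_ofList _ _).mp hk
  have hkh : k ≠ h := fun e => hd (e ▸ hkd)
  rw [hcd k hkh]

-- In a sorted list h :: t, the first pvRun h t elements of t are copies of h and
-- everything after them is strictly greater than h.
theorem run_struct : ∀ (t : List Int) (h : Int), (h :: t).Pairwise (· ≤ ·) →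
    t.take (pvRun h t) = List.replicate (pvRun h t) h ∧ ∀ k ∈ t.drop (pvRun h t), h < k := by
  intro t
  induction t with
  | nil => intro h _; simp [pvRun]
  | cons x t' ih =>
    intro h hp
    have hhx : h ≤ x := (List.pairwise_cons.mp hp).1 x (by simp)
    have hp' : (x :: t').Pairwise (· ≤ ·) := (List.pairwise_cons.mp hp).2
    by_cases hx : x = h
    · subst hx
      have hr := ih x hp'
      have hrv : pvRun x (x :: t') = pvRun x t' + 1 := by simp [pvRun]
      constructor
      · rw [hrv, List.take_succ_cons, hr.1, List.replicate_succ]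
      · rw [hrv, List.drop_succ_cons]
        exact hr.2
    · constructor
      · simp [pvRun, hx]
      · simp only [pvRun, if_neg hx, List.drop_zero]
        intro k hk
        rcases List.mem_cons.mp hk with rfl | hk'
        · exact lt_of_le_of_ne hhx (fun e => hx e.symm)
        · have hxk : x ≤ k := (List.pairwise_cons.mp hp').1 k hk'
          exact lt_of_lt_of_le (lt_of_le_of_ne hhx (fun e => hx e.symm)) hxk

-- The run scan over a sorted list computes total + pvF.
theorem scan_sorted : ∀ (n : Nat) (s : List Int), s.length ≤ n →
    s.Pairwise (· ≤ ·) → ∀ total : Int, pvScan s total = total + pvF s := by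
  intro n
  induction n with
  | zero =>
    intro s hlen _ total
    have : s = [] := List.eq_nil_of_length_eq_zero (Nat.le_zero.mp hlen)
    subst this
    rw [pvScan]
    simp [pvF, PySem.Set.ofList]
  | succ n ih =>
    intro s hlen hp total
    cases s with
    | nil => rw [pvScan]; simp [pvF, PySem.Set.ofList]
    | cons h t =>
      have hrs := run_struct t h hp
      set r := pvRun h t with hr
      have hsplit : h :: t = List.replicate (r + 1) h ++ t.drop r := by
        rw [List.replicate_succ]
        simp only [List.cons_append, List.cons.injEq, true_and]
        conv_lhs => rw [← List.take_append_drop r t]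
        rw [hrs.1]
      have hnotmem : h ∉ t.drop r := fun hm => lt_irrefl h (hrs.2 h hm)
      have hdp : (t.drop r).Pairwise (· ≤ ·) :=
        ((List.pairwise_cons.mp hp).2).sublist (List.drop_sublist r t)
      have hdl : (t.drop r).length ≤ n := by
        have h1 : (h :: t).length = t.length + 1 := rfl
        have h2 : (t.drop r).length ≤ t.length := by
          rw [List.length_drop]; omega
        omega
      have hstep : pvScan (h :: t) total
          = pvScan (t.drop r) (if 1 + r ≥ 2 then total + h else total) := by
        rw [pvScan.eq_2]
        simp only [← hr]
        have e : 1 + r - 1 = r := by omega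
        rw [e]
      rw [hstep, ih (t.drop r) hdl hdp]
      rw [hsplit, pvF_run_split r h (t.drop r) hnotmem]
      by_cases h2 : 1 ≤ r
      · rw [if_pos (by omega), if_pos (by omega)]; ring
      · rw [if_neg (by omega), if_neg (by omega)]; ring

-- ===== VERDICT (by name: the statement is the Claim_ definition above) =====
theorem sum_of_duplicates_spec : Claim_equal_sum_of_duplicates := by
  intro array _
  unfold Spec_sum_of_duplicates sum_of_duplicates_alt
  rw [A_eq_pvF]
  rw [scan_sorted (PySem.List.sorted array (fun x => x) false).length _ le_rfl
      (by simpa using PySem.List.sorted_pairwise array (fun x => x))]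
  rw [pvF_perm (PySem.List.sorted_perm array (fun x => x) false)]
  ring
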